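-- pv_equiv track=rewrite | github.com/Rankuli-Ang/ball_v2 | src/prognosticator.py | peaks_determination
-- ===== SOURCE A (Python) =====
-- def peaks_determination(world_height: int, sample: list) -> list:
--     """Defines all points in a sample with a minimum 'y'."""
--
--     min_y = world_height
--     peak_steps = []
--     step_counter = 0
--
--     for step in sample:
--         if step[1] < min_y:
--             min_y = step[1]
--             peak_steps.clear()
--             peak_steps.append(step)
--             step_counter += 1
--
--         elif step[1] == min_y:
--             peak_steps.append(step)
--
--     return peak_steps
-- ===== SOURCE B (Python) =====
-- def peaks_determination(world_height: int, sample: list) -> list: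
--     """Defines all points in a sample with a minimum 'y'."""
--     m = min([world_height] + [step[1] for step in sample])
--     return [step for step in sample if step[1] == m]
-- ===== Notes on version B (the rewrite author's own statement) =====
-- stated objective: simpler
-- what changed: Replaced the running-minimum pass with clear/append bookkeeping by a two-pass find-the-minimum-then-filter formulation.
import Mathlib
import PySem

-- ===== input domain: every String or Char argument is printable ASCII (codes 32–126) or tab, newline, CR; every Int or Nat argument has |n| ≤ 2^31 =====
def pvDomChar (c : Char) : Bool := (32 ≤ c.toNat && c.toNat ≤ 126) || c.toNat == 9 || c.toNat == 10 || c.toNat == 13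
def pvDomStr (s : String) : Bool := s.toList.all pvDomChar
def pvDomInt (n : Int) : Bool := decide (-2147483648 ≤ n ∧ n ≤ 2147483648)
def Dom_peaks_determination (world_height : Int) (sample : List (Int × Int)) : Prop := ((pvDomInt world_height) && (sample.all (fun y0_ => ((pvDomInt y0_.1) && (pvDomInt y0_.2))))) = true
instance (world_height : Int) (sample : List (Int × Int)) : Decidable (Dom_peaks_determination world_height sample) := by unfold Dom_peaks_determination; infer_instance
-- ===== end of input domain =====

-- B replaces A's running-minimum pass (clear/append bookkeeping) by find-the-minimum-then-filter; objective: simpler.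


-- ===== PORT A =====
-- loop body of A: state = (min_y, peak_steps, step_counter)
def peaksA_loop (steps : List (Int × Int)) (min_y : Int) (peak_steps : List (Int × Int)) (step_counter : Int) : List (Int × Int) :=
  match steps with
  | [] => peak_steps
  | step :: rest =>
    if step.2 < min_y then
      peaksA_loop rest step.2 [step] (step_counter + 1)
    else if step.2 = min_y then
      peaksA_loop rest min_y (peak_steps ++ [step]) step_counter
    else
      peaksA_loop rest min_y peak_steps step_counter

def peaks_determination (world_height : Int) (sample : List (Int × Int)) : List (Int × Int) :=
  peaksA_loop sample world_height [] 0

-- ===== PORT B =====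
def peaks_determination_alt (world_height : Int) (sample : List (Int × Int)) : List (Int × Int) :=
  let m := (sample.map (·.2)).foldl min world_height
  sample.filter (fun step => step.2 == m)

-- ===== PRECONDITION & SPEC =====
def Spec_peaks_determination (world_height : Int) (sample : List (Int × Int)) (out : List (Int × Int)) : Prop := out = peaks_determination_alt world_height sample
instance (world_height : Int) (sample : List (Int × Int)) (out : List (Int × Int)) : Decidable (Spec_peaks_determination world_height sample out) := by unfold Spec_peaks_determination; infer_instance

-- ===== CLAIM (what is proved, stated in full; the proofs are below) =====
def Claim_equal_peaks_determination : Prop := ∀ (world_height : Int) (sample : List (Int × Int)), Dom_peaks_determination world_height sample → Spec_peaks_determination world_height sample (peaks_determination world_height sample)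

-- ===== LEMMAS AND PROOFS =====

-- characterisation of A's loop: result = stale-or-cleared prefix ++ filter at the final minimum
theorem peaksA_loop_eq (steps : List (Int × Int)) : ∀ (m : Int) (acc : List (Int × Int)) (c : Int),
    peaksA_loop steps m acc c =
      (if (steps.map (·.2)).foldl min m = m then acc else []) ++
        steps.filter (fun s => s.2 == ((steps.map (·.2)).foldl min m)) := by
  induction steps with
  | nil => intro m acc c; simp [peaksA_loop]
  | cons s rest ih =>
    intro m acc c
    have hle : ∀ (a : Int) (l : List Int), l.foldl min a ≤ a := by
      intro a l
      induction l generalizing a with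
      | nil => simp
      | cons x xs ih2 => simpa using le_trans (ih2 (min a x)) (min_le_left a x)
    simp only [peaksA_loop, List.map_cons, List.foldl_cons]
    by_cases h1 : s.2 < m
    · rw [ih]
      have hmin : min m s.2 = s.2 := by omega
      simp only [hmin]
      have hle2 : (rest.map (·.2)).foldl min s.2 ≤ s.2 := hle _ _
      have hne : ¬ ((rest.map (·.2)).foldl min s.2 = m) := by omega
      by_cases hh : (rest.map (·.2)).foldl min s.2 = s.2
      · simp [h1, hh]; omega
      · have hh2 : ¬ (s.2 = (rest.map (·.2)).foldl min s.2) := fun e => hh e.symm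
        simp [h1, hne, hh, hh2]
    · by_cases h2 : s.2 = m
      · rw [if_neg h1, if_pos h2, ih]
        have hmin : min m s.2 = m := by omega
        simp only [hmin]
        have hle2 : (rest.map (·.2)).foldl min m ≤ m := hle _ _
        by_cases h3 : (rest.map (·.2)).foldl min m = m
        · simp [h3, h2]
        · have : ¬ (s.2 = (rest.map (·.2)).foldl min m) := by omega
          simp [h3, this]
      · rw [if_neg h1, if_neg h2, ih]
        have hmin : min m s.2 = m := by omega
        simp only [hmin]
        have hle2 : (rest.map (·.2)).foldl min m ≤ m := hle _ _
        have : ¬ (s.2 = (rest.map (·.2)).foldl min m) := by omega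
        simp [this]

-- ===== VERDICT (by name: the statement is the Claim_ definition above) =====
theorem peaks_determination_spec : Claim_equal_peaks_determination := by
  intro w sample _
  unfold Spec_peaks_determination peaks_determination peaks_determination_alt
  rw [peaksA_loop_eq]
  simp
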